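-- pv_equiv track=rewrite | github.com/baileybUAV/Design | PDF_EXTRACT_UI.py | Read_Json_Grades
-- ===== SOURCE A (Python) =====
-- def Read_Json_Grades(JSON_data):
--     """Reads a JSON file and extracts passed, failed, and in-progress courses."""
--     passed, failed, inprog = [], [], []
--
--     for k, s in JSON_data.items():
--         if s in ["A", "B", "C", "S"]:
--             passed.append(k)
--         elif s == "IP":
--             inprog.append(k)
--         else:
--             failed.append(k)
--
--     return passed, failed, inprog
-- ===== SOURCE B (Python) =====
-- def Read_Json_Grades(JSON_data):
--     """Reads a JSON file and extracts passed, failed, and in-progress courses."""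
--     PASSING = {"A", "B", "C", "S"}
--     passed = [k for k, s in JSON_data.items() if s in PASSING]
--     failed = [k for k, s in JSON_data.items() if s not in PASSING and s != "IP"]
--     inprog = [k for k, s in JSON_data.items() if s == "IP"]
--     return passed, failed, inprog
-- ===== Notes on version B (the rewrite author's own statement) =====
-- stated objective: alternative
-- what changed: Replaces the single accumulator loop with three independent filtering passes (set-membership comprehensions), one per output list.
import Mathlib
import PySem

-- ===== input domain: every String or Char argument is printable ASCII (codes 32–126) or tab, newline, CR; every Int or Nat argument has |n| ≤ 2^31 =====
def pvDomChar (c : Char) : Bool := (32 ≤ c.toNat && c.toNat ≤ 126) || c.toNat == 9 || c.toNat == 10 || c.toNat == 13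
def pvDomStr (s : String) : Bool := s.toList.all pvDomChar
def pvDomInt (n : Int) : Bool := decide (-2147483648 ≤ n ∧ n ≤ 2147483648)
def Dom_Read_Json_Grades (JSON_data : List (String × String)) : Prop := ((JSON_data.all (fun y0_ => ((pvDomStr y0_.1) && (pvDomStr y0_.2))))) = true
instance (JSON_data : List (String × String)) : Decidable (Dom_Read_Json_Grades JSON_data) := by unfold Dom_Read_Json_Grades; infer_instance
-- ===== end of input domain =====

-- B replaces A's single accumulator loop by three independent filtering passes (one per output list); same cost, different decomposition.


-- ===== PORT A =====
-- one pass over the items, appending each key to one of three accumulator lists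
def Read_Json_Grades (JSON_data : List (String × String)) : List String × List String × List String :=
  JSON_data.foldl
    (fun acc kv =>
      if kv.2 == "A" || kv.2 == "B" || kv.2 == "C" || kv.2 == "S" then
        (acc.1 ++ [kv.1], acc.2.1, acc.2.2)
      else if kv.2 == "IP" then
        (acc.1, acc.2.1, acc.2.2 ++ [kv.1])
      else
        (acc.1, acc.2.1 ++ [kv.1], acc.2.2))
    ([], [], [])

-- ===== PORT B =====
-- three independent filtering passes over the items, one per output list
def pvPassing (s : String) : Bool := s == "A" || s == "B" || s == "C" || s == "S"

def Read_Json_Grades_alt (JSON_data : List (String × String)) : List String × List String × List String :=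
  ((JSON_data.filter (fun kv => pvPassing kv.2)).map Prod.fst,
   (JSON_data.filter (fun kv => !pvPassing kv.2 && kv.2 != "IP")).map Prod.fst,
   (JSON_data.filter (fun kv => kv.2 == "IP")).map Prod.fst)

-- ===== PRECONDITION & SPEC =====
def Spec_Read_Json_Grades (JSON_data : List (String × String)) (out : List String × List String × List String) : Prop := out = Read_Json_Grades_alt JSON_data
instance (JSON_data : List (String × String)) (out : List String × List String × List String) : Decidable (Spec_Read_Json_Grades JSON_data out) := by unfold Spec_Read_Json_Grades; infer_instance

-- ===== CLAIM (what is proved, stated in full; the proofs are below) =====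
def Claim_equal_Read_Json_Grades : Prop := ∀ (JSON_data : List (String × String)), Dom_Read_Json_Grades JSON_data → Spec_Read_Json_Grades JSON_data (Read_Json_Grades JSON_data)

-- ===== LEMMAS AND PROOFS =====
-- loop invariant: A's fold from any accumulator equals the accumulator extended with B's three filtered lists
theorem Read_Json_Grades_fold (d : List (String × String)) (a b c : List String) :
    d.foldl
      (fun acc kv =>
        if kv.2 == "A" || kv.2 == "B" || kv.2 == "C" || kv.2 == "S" then
          (acc.1 ++ [kv.1], acc.2.1, acc.2.2)
        else if kv.2 == "IP" then
          (acc.1, acc.2.1, acc.2.2 ++ [kv.1])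
        else
          (acc.1, acc.2.1 ++ [kv.1], acc.2.2))
      (a, b, c)
    = (a ++ (d.filter (fun kv => pvPassing kv.2)).map Prod.fst,
       b ++ (d.filter (fun kv => !pvPassing kv.2 && kv.2 != "IP")).map Prod.fst,
       c ++ (d.filter (fun kv => kv.2 == "IP")).map Prod.fst) := by
  induction d generalizing a b c with
  | nil => simp
  | cons kv t ih =>
      simp only [List.foldl_cons]
      by_cases hp : (kv.2 == "A" || kv.2 == "B" || kv.2 == "C" || kv.2 == "S") = true
      · rw [if_pos hp, ih]
        have h := hp
        simp only [Bool.or_eq_true, beq_iff_eq] at h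
        rcases h with ((h | h) | h) | h <;> simp [pvPassing, h]
      · rw [if_neg hp]
        by_cases hip : (kv.2 == "IP") = true
        · rw [if_pos hip, ih]
          have h : kv.2 = "IP" := by simpa using hip
          simp [pvPassing, h]
        · rw [if_neg hip, ih]
          simp only [Bool.or_eq_true, beq_iff_eq, not_or] at hp
          simp only [beq_iff_eq] at hip
          obtain ⟨⟨⟨h1, h2⟩, h3⟩, h4⟩ := hp
          simp [pvPassing, h1, h2, h3, h4, hip]

-- ===== VERDICT (by name: the statement is the Claim_ definition above) =====
theorem Read_Json_Grades_spec : Claim_equal_Read_Json_Grades := by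
  intro d _
  unfold Spec_Read_Json_Grades Read_Json_Grades Read_Json_Grades_alt
  rw [Read_Json_Grades_fold]
  simp
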